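-- pv_equiv track=rewrite | github.com/mochy99/algorithms | merge_sort.py | parallelSort
-- ===== SOURCE A (Python) =====
-- def parallelSort(left_org, left_ind, right_org, right_ind):
--     result_org = []
--     result_ind = []
--     i, j = 0, 0
--     while i < len(left_org) and j < len(right_org):
--         if left_ind[i] > right_ind[j] or (left_ind[i] == right_ind[j] and left_org[i][0] > right_org[j][0]):
--             result_org.append(left_org[i])
--             result_ind.append(left_ind[i])
--             i += 1
--         else:
--             result_org.append(right_org[j])
--             result_ind.append(right_ind[j])
--             j += 1
--
--     result_org.extend(left_org[i:])
--     result_ind.extend(left_ind[i:])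
--     result_org.extend(right_org[j:])
--     result_ind.extend(right_ind[j:])
--
--     return result_org, result_ind
-- ===== SOURCE B (Python) =====
-- def parallelSort(left_org, left_ind, right_org, right_ind):
--     # Pair each record with its key, merge the two pair lists (kept reversed so
--     # the next element is popped O(1) from the end), then unzip the merged part
--     # and append the unconsumed remainder of every input list.
--     lstack = [(left_ind[k], left_org[k]) for k in range(len(left_org))][::-1]
--     rstack = [(right_ind[k], right_org[k]) for k in range(len(right_org))][::-1]
--     n_left, n_right = len(lstack), len(rstack)
--     merged = []
--     while lstack and rstack:
--         (lind, lorg), (rind, rorg) = lstack[-1], rstack[-1]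
--         if lind > rind or (lind == rind and lorg[0] > rorg[0]):
--             merged.append(lstack.pop())
--         else:
--             merged.append(rstack.pop())
--     i = n_left - len(lstack)
--     j = n_right - len(rstack)
--     return ([o for _, o in merged] + left_org[i:] + right_org[j:],
--             [k for k, _ in merged] + left_ind[i:] + right_ind[j:])
-- ===== Notes on version B (the rewrite author's own statement) =====
-- stated objective: alternative
-- what changed: B pairs each key with its record by position into one pair list per side, merges the two reversed pair lists as stacks popped O(1) from the end into a single merged pair list, then unzips it and appends the unconsumed remainder of every input list, instead of A's two index pointers walking four parallel arrays while filling two result lists in lockstep; …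
-- outside the precondition, e.g. on parallelSort([[1], [2]], [5], [[3]], [9]): A returns ([[3], [1], [2]], [9, 5]), B raises IndexError; on parallelSort([], [5], [[1], [2]], [7]): A returns ([[1], [2]], [5, 7]), B raises IndexError
import Mathlib
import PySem

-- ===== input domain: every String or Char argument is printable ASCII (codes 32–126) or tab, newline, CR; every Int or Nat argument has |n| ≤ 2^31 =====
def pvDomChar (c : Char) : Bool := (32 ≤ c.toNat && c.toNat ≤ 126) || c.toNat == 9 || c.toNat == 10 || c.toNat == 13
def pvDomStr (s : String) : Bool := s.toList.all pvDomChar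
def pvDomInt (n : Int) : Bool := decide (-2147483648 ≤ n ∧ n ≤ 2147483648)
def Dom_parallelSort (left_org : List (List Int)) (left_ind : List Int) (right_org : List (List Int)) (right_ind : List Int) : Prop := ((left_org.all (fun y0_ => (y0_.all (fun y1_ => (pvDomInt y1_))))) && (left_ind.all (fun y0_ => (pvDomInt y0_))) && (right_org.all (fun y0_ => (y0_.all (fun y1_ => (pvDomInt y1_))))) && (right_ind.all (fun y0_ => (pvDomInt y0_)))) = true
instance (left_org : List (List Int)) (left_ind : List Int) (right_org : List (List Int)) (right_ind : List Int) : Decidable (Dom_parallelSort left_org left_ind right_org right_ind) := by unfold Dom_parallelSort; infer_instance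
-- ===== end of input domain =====

-- B zips each key with its record into one pair list per side, merges the two
-- reversed pair lists as stacks popped from the end into a single pair list,
-- then unzips the merged part and appends the unconsumed remainder of every
-- input list — instead of A's two index pointers over four parallel arrays
-- filling two result lists in lockstep.
-- Objective: alternative (same cost, different data structure and loop shape).

-- ===== PORT A =====
-- The while loop with indices i, j and the two accumulator lists, as in the Python.
-- Indexing left_ind[i] / right_ind[j] / left_org[i][0] / right_org[j][0] is ported
-- with getD/headD defaults: exact when in range / nonempty, which Pre_ guarantees
-- (compared org prefixes covered by their ind lists, no reachable tie on an empty
-- inner list). Slices xs[i:] with 0 ≤ i are drop i.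
def pvMergeLoopA (left_org : List (List Int)) (left_ind : List Int)
    (right_org : List (List Int)) (right_ind : List Int) (i j : Nat)
    (accO : List (List Int)) (accI : List Int) : List (List Int) × List Int :=
  if _h : i < left_org.length ∧ j < right_org.length then
    if left_ind.getD i 0 > right_ind.getD j 0 ∨
       (left_ind.getD i 0 = right_ind.getD j 0 ∧
        (left_org.getD i []).headD 0 > (right_org.getD j []).headD 0) then
      pvMergeLoopA left_org left_ind right_org right_ind (i+1) j
        (accO ++ [left_org.getD i []]) (accI ++ [left_ind.getD i 0])
    else
      pvMergeLoopA left_org left_ind right_org right_ind i (j+1)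
        (accO ++ [right_org.getD j []]) (accI ++ [right_ind.getD j 0])
  else
    (accO ++ left_org.drop i ++ right_org.drop j,
     accI ++ left_ind.drop i ++ right_ind.drop j)
termination_by (left_org.length - i) + (right_org.length - j)
decreasing_by all_goals omega

def parallelSort (left_org : List (List Int)) (left_ind : List Int)
    (right_org : List (List Int)) (right_ind : List Int) : List (List Int) × List Int :=
  pvMergeLoopA left_org left_ind right_org right_ind 0 0 [] []

-- ===== PORT B =====
-- lstack/rstack = [(ind[k], org[k]) for k in range(len(org))][::-1]
-- (range(len(..)) is List.range, the indexing ind[k]/org[k] is ported with getD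
-- defaults, exact when in range -- which Pre_ guarantees; [::-1] is reverse);
-- the while loop pops from the stack tops (L[-1] = getLast, exact as the stacks
-- are nonempty inside the loop) and returns (merged, lstack, rstack) at exit;
-- the consumed counts i, j are the stack lengths' differences; slices xs[i:]
-- with 0 <= i are drop i; the tie comparison lorg[0] is ported as headD 0, exact
-- under Pre_ (which keeps every input on which Python would evaluate [0] of an
-- empty list out).
def pvMergeStackB (L R merged : List (Int × List Int)) :
    List (Int × List Int) × List (Int × List Int) × List (Int × List Int) :=
  if h : L ≠ [] ∧ R ≠ [] then
    let l := L.getLast h.1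
    let r := R.getLast h.2
    if l.1 > r.1 ∨ (l.1 = r.1 ∧ l.2.headD 0 > r.2.headD 0) then
      pvMergeStackB L.dropLast R (merged ++ [l])
    else
      pvMergeStackB L R.dropLast (merged ++ [r])
  else (merged, L, R)
termination_by L.length + R.length
decreasing_by
  all_goals
    have hL := List.length_pos_of_ne_nil h.1
    have hR := List.length_pos_of_ne_nil h.2
    simp [List.length_dropLast]; omega

def parallelSort_alt (left_org : List (List Int)) (left_ind : List Int)
    (right_org : List (List Int)) (right_ind : List Int) : List (List Int) × List Int :=
  let lstack := ((List.range left_org.length).map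
      (fun k => (left_ind.getD k 0, left_org.getD k []))).reverse
  let rstack := ((List.range right_org.length).map
      (fun k => (right_ind.getD k 0, right_org.getD k []))).reverse
  let nLeft := lstack.length
  let nRight := rstack.length
  let res := pvMergeStackB lstack rstack []
  let i := nLeft - res.2.1.length
  let j := nRight - res.2.2.length
  ((res.1.map (fun p => p.2)) ++ left_org.drop i ++ right_org.drop j,
   (res.1.map (fun p => p.1)) ++ left_ind.drop i ++ right_ind.drop j)

-- ===== PRECONDITION & SPEC =====
-- Pre_ excludes inputs on which Python A or Python B raises: an org list not
-- covered by its ind list (A's loop can run off the end of an ind list; B's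
-- positional pairing indexes ind[k] for every org position) and, unless one
-- org side is empty so the merge loop never runs, any entry with an empty org
-- list whose ind could tie with the other side's compared prefix (a reached
-- tie reads org[0] — an IndexError). It is a conservative over-approximation:
-- A also returns on some excluded inputs (the loop ends before the bad index /
-- the tie is never reached).
def Pre_parallelSort (left_org : List (List Int)) (left_ind : List Int)
    (right_org : List (List Int)) (right_ind : List Int) : Prop :=
  left_org.length ≤ left_ind.length ∧ right_org.length ≤ right_ind.length ∧
  (left_org = [] ∨ right_org = [] ∨
   ((∀ p ∈ left_ind.zip left_org, p.2 = [] → p.1 ∉ right_ind.take right_org.length) ∧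
    (∀ p ∈ right_ind.zip right_org, p.2 = [] → p.1 ∉ left_ind.take left_org.length)))

instance (left_org : List (List Int)) (left_ind : List Int) (right_org : List (List Int)) (right_ind : List Int) : Decidable (Pre_parallelSort left_org left_ind right_org right_ind) := by unfold Pre_parallelSort; infer_instance

def pvWitness_parallelSort : List (List Int) × List Int × List (List Int) × List Int :=
  ([[3], [1]], [2, 1], [[2]], [2])

def Spec_parallelSort (left_org : List (List Int)) (left_ind : List Int) (right_org : List (List Int)) (right_ind : List Int) (out : List (List Int) × List Int) : Prop := out = parallelSort_alt left_org left_ind right_org right_ind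
instance (left_org : List (List Int)) (left_ind : List Int) (right_org : List (List Int)) (right_ind : List Int) (out : List (List Int) × List Int) : Decidable (Spec_parallelSort left_org left_ind right_org right_ind out) := by unfold Spec_parallelSort; infer_instance

-- ===== CLAIM (what is proved, stated in full; the proofs are below) =====
def Claim_equal_parallelSort : Prop := ∀ (left_org : List (List Int)) (left_ind : List Int) (right_org : List (List Int)) (right_ind : List Int), Dom_parallelSort left_org left_ind right_org right_ind → Pre_parallelSort left_org left_ind right_org right_ind → Spec_parallelSort left_org left_ind right_org right_ind (parallelSort left_org left_ind right_org right_ind)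

-- ===== LEMMAS AND PROOFS =====

-- general zip projections (not under these statements in Mathlib)
theorem pv_zip_map_fst {α β : Type} : ∀ (xs : List α) (ys : List β),
    (xs.zip ys).map Prod.fst = xs.take ys.length
  | [], _ => by simp
  | _ :: _, [] => by simp
  | x :: xs, y :: ys => by simp [pv_zip_map_fst xs ys]

theorem pv_zip_map_snd {α β : Type} : ∀ (xs : List α) (ys : List β),
    (xs.zip ys).map Prod.snd = ys.take xs.length
  | [], _ => by simp
  | _ :: _, [] => by simp
  | x :: xs, y :: ys => by simp [pv_zip_map_snd xs ys]

-- take of the front ++ drop from an absolute index splices a drop back together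
theorem pv_take_drop_splice {α : Type} (xs : List α) (i k : Nat) :
    (xs.drop i).take k ++ xs.drop (i + k) = xs.drop i := by
  rw [← List.drop_drop, List.take_append_drop]

theorem pv_splice {α : Type} (xs : List α) (i k : Nat) (t : List α) :
    (xs.drop i).take k ++ (xs.drop (i + k) ++ t) = xs.drop i ++ t := by
  rw [← List.append_assoc, pv_take_drop_splice]

-- dropping distributes over zip (not under this statement in Mathlib)
theorem pv_drop_zip {α β : Type} (xs : List α) (ys : List β) (n : Nat) :
    (xs.zip ys).drop n = (xs.drop n).zip (ys.drop n) := by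
  simp [List.zip_eq_zipWith, List.drop_zipWith]

-- positional pairing [(xs[k], ys[k]) for k in range(len(ys))] is zip when ys is covered
theorem pv_index_pairs_eq_zip {α β : Type} (xs : List α) (ys : List β) (dx : α) (dy : β)
    (h : ys.length ≤ xs.length) :
    (List.range ys.length).map (fun k => (xs.getD k dx, ys.getD k dy)) = xs.zip ys := by
  apply List.ext_getElem
  · simp [Nat.min_eq_right h]
  · intro i h1 h2
    have hy : i < ys.length := by simpa using h1
    have hx : i < xs.length := lt_of_lt_of_le hy h
    simp [List.getD_eq_getElem?_getD, List.getElem?_eq_getElem hx,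
      List.getElem?_eq_getElem hy]

-- the Boolean form of A's take-left condition
def pvBefore (x y : Int × List Int) : Bool :=
  decide (x.1 > y.1) || (decide (x.1 = y.1) && decide (x.2.headD 0 > y.2.headD 0))

-- front-view of B's stack loop: (merged, left remainder, right remainder)
def pvMergeF : List (Int × List Int) → List (Int × List Int) →
    List (Int × List Int) × List (Int × List Int) × List (Int × List Int)
  | [], rs => ([], [], rs)
  | l :: ls, [] => ([], l :: ls, [])
  | l :: ls, r :: rs =>
      if pvBefore l r then
        ((pvMergeF ls (r :: rs)).1.cons l, (pvMergeF ls (r :: rs)).2)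
      else
        ((pvMergeF (l :: ls) rs).1.cons r, (pvMergeF (l :: ls) rs).2)

theorem pvMergeF_nil_right (L : List (Int × List Int)) : pvMergeF L [] = ([], L, []) := by
  cases L <;> simp [pvMergeF]

theorem pvMergeF_cons_cons (l r : Int × List Int) (ls rs : List (Int × List Int)) :
    pvMergeF (l :: ls) (r :: rs) =
      if pvBefore l r then ((pvMergeF ls (r :: rs)).1.cons l, (pvMergeF ls (r :: rs)).2)
      else ((pvMergeF (l :: ls) rs).1.cons r, (pvMergeF (l :: ls) rs).2) := by
  simp only [pvMergeF]

-- the remainders of the front-view merge are suffixes of the inputs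
theorem pv_mergeF_suffix (L R : List (Int × List Int)) :
    ∃ a b, a ≤ L.length ∧ b ≤ R.length ∧
      (pvMergeF L R).2.1 = L.drop a ∧ (pvMergeF L R).2.2 = R.drop b := by
  match L, R with
  | [], R => exact ⟨0, 0, by simp, by simp, by simp [pvMergeF], by simp [pvMergeF]⟩
  | l :: ls, [] => exact ⟨0, 0, by simp, by simp, by simp [pvMergeF], by simp [pvMergeF]⟩
  | l :: ls, r :: rs =>
      by_cases hb : pvBefore l r = true
      · rw [pvMergeF_cons_cons, if_pos hb]
        obtain ⟨a, b, ha, hbb, h1, h2⟩ := pv_mergeF_suffix ls (r :: rs)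
        exact ⟨a + 1, b, by simp; omega, hbb, by simpa using h1, by simpa using h2⟩
      · rw [pvMergeF_cons_cons, if_neg hb]
        obtain ⟨a, b, ha, hbb, h1, h2⟩ := pv_mergeF_suffix (l :: ls) rs
        exact ⟨a, b + 1, by simpa using ha, by simp; omega, by simpa using h1, by simpa using h2⟩
termination_by L.length + R.length
decreasing_by all_goals simp

theorem pv_stackB_eq (L R merged : List (Int × List Int)) :
    pvMergeStackB L.reverse R.reverse merged =
      (merged ++ (pvMergeF L R).1, (pvMergeF L R).2.1.reverse, (pvMergeF L R).2.2.reverse) := by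
  match L, R with
  | [], R =>
      rw [pvMergeStackB, dif_neg (by simp)]
      simp [pvMergeF]
  | l :: ls, [] =>
      rw [pvMergeStackB, dif_neg (by simp)]
      simp [pvMergeF_nil_right]
  | l :: ls, r :: rs =>
      have hne : (l :: ls).reverse ≠ [] ∧ (r :: rs).reverse ≠ [] := by simp
      rw [pvMergeStackB, dif_pos hne]
      simp only [List.reverse_cons, List.getLast_concat, List.dropLast_concat]
      rw [pvMergeF_cons_cons]
      by_cases hc : l.1 > r.1 ∨ (l.1 = r.1 ∧ l.2.headD 0 > r.2.headD 0)
      · have hb : pvBefore l r = true := by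
          simp only [pvBefore, Bool.or_eq_true, Bool.and_eq_true, decide_eq_true_eq]
          tauto
        rw [if_pos hc, if_pos hb, ← List.reverse_cons (a := r) (as := rs),
          pv_stackB_eq ls (r :: rs) (merged ++ [l])]
        simp
      · have hb : pvBefore l r = false := by
          simp only [pvBefore, Bool.or_eq_false_iff, Bool.and_eq_false_iff,
            decide_eq_false_iff_not]
          tauto
        rw [if_neg hc, if_neg (by simp [hb]), ← List.reverse_cons (a := l) (as := ls),
          pv_stackB_eq (l :: ls) rs (merged ++ [r])]
        simp
termination_by L.length + R.length
decreasing_by all_goals simp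

set_option maxRecDepth 4096 in
theorem pv_loopA_eq (lo : List (List Int)) (li : List Int)
    (ro : List (List Int)) (ri : List Int)
    (h1 : lo.length ≤ li.length) (h2 : ro.length ≤ ri.length)
    (i j : Nat) (hi : i ≤ lo.length) (hj : j ≤ ro.length)
    (accO : List (List Int)) (accI : List Int) :
    pvMergeLoopA lo li ro ri i j accO accI =
      (accO ++ (pvMergeF ((li.drop i).zip (lo.drop i)) ((ri.drop j).zip (ro.drop j))).1.map (fun p => p.2)
            ++ (pvMergeF ((li.drop i).zip (lo.drop i)) ((ri.drop j).zip (ro.drop j))).2.1.map (fun p => p.2)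
            ++ (pvMergeF ((li.drop i).zip (lo.drop i)) ((ri.drop j).zip (ro.drop j))).2.2.map (fun p => p.2),
       accI ++ (pvMergeF ((li.drop i).zip (lo.drop i)) ((ri.drop j).zip (ro.drop j))).1.map (fun p => p.1)
            ++ (pvMergeF ((li.drop i).zip (lo.drop i)) ((ri.drop j).zip (ro.drop j))).2.1.map (fun p => p.1)
            ++ li.drop lo.length
            ++ (pvMergeF ((li.drop i).zip (lo.drop i)) ((ri.drop j).zip (ro.drop j))).2.2.map (fun p => p.1)
            ++ ri.drop ro.length) := by
  rw [pvMergeLoopA]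
  by_cases h : i < lo.length ∧ j < ro.length
  · have hi' : i < li.length := by omega
    have hj' : j < ri.length := by omega
    have hdi : li.drop i = li[i] :: li.drop (i+1) := List.drop_eq_getElem_cons hi'
    have hdo : lo.drop i = lo[i] :: lo.drop (i+1) := List.drop_eq_getElem_cons (by omega)
    have hdj : ri.drop j = ri[j] :: ri.drop (j+1) := List.drop_eq_getElem_cons hj'
    have hdr : ro.drop j = ro[j] :: ro.drop (j+1) := List.drop_eq_getElem_cons (by omega)
    simp only [h, List.getD_eq_getElem _ _ hi', List.getD_eq_getElem _ _ hj',
      List.getD_eq_getElem _ _ (show i < lo.length by omega),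
      List.getD_eq_getElem _ _ (show j < ro.length by omega)]
    by_cases hc : li[i] > ri[j] ∨ (li[i] = ri[j] ∧ (lo[i]).headD 0 > (ro[j]).headD 0)
    · have hb : pvBefore (li[i], lo[i]) (ri[j], ro[j]) = true := by
        simp only [pvBefore, Bool.or_eq_true, Bool.and_eq_true, decide_eq_true_eq]
        tauto
      have hM : pvMergeF ((li.drop i).zip (lo.drop i)) ((ri.drop j).zip (ro.drop j)) =
          ((pvMergeF ((li.drop (i+1)).zip (lo.drop (i+1))) ((ri.drop j).zip (ro.drop j))).1.cons (li[i], lo[i]),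
           (pvMergeF ((li.drop (i+1)).zip (lo.drop (i+1))) ((ri.drop j).zip (ro.drop j))).2) := by
        rw [hdi, hdo, hdj, hdr, List.zip_cons_cons, List.zip_cons_cons,
          pvMergeF_cons_cons, if_pos hb, ← List.zip_cons_cons, ← hdj, ← hdr]
      rw [if_pos hc,
        pv_loopA_eq lo li ro ri h1 h2 (i+1) j (by omega) hj (accO ++ [lo[i]]) (accI ++ [li[i]]), hM]
      simp
    · have hb : pvBefore (li[i], lo[i]) (ri[j], ro[j]) = false := by
        simp only [pvBefore, Bool.or_eq_false_iff, Bool.and_eq_false_iff,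
          decide_eq_false_iff_not]
        constructor
        · omega
        · by_cases he : li[i] = ri[j]
          · right; simp only [List.headD_eq_head?_getD] at hc ⊢; omega
          · left; exact he
      have hM : pvMergeF ((li.drop i).zip (lo.drop i)) ((ri.drop j).zip (ro.drop j)) =
          ((pvMergeF ((li.drop i).zip (lo.drop i)) ((ri.drop (j+1)).zip (ro.drop (j+1)))).1.cons (ri[j], ro[j]),
           (pvMergeF ((li.drop i).zip (lo.drop i)) ((ri.drop (j+1)).zip (ro.drop (j+1)))).2) := by
        rw [hdi, hdo, hdj, hdr, List.zip_cons_cons, List.zip_cons_cons,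
          pvMergeF_cons_cons, if_neg (by simp [hb]), ← List.zip_cons_cons, ← hdi, ← hdo]
      rw [if_neg hc,
        pv_loopA_eq lo li ro ri h1 h2 i (j+1) hi (by omega) (accO ++ [ro[j]]) (accI ++ [ri[j]]), hM]
      simp
  · rw [dif_neg h]
    rcases Nat.lt_or_ge i lo.length with hlt | hge
    · -- right side exhausted: j = ro.length
      have hj' : j = ro.length := by omega
      subst hj'
      simp only [List.drop_length, List.zip_nil_right, pvMergeF_nil_right,
        List.map_nil, List.append_nil]
      rw [pv_zip_map_snd, pv_zip_map_fst,
        List.take_of_length_le (by simp; omega : (lo.drop i).length ≤ (li.drop i).length)]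
      simp only [List.length_drop, Prod.mk.injEq, List.append_assoc]
      refine ⟨by trivial, ?_⟩
      rw [show li.drop lo.length = li.drop (i + (lo.length - i)) by congr 1; omega,
        pv_splice]
    · -- left side exhausted: i = lo.length
      have hi' : i = lo.length := by omega
      subst hi'
      simp only [List.drop_length, List.zip_nil_right, pvMergeF, List.map_nil,
        List.append_nil]
      rw [pv_zip_map_snd, pv_zip_map_fst,
        List.take_of_length_le (by simp; omega : (ro.drop j).length ≤ (ri.drop j).length)]
      simp only [List.length_drop, Prod.mk.injEq, List.append_assoc]
      refine ⟨by trivial, ?_⟩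
      rw [show ri.drop ro.length = ri.drop (j + (ro.length - j)) by congr 1; omega,
        pv_take_drop_splice]
termination_by (lo.length - i) + (ro.length - j)
decreasing_by all_goals omega

-- ===== VERDICT (by name: the statement is the Claim_ definition above) =====
theorem parallelSort_spec : Claim_equal_parallelSort := by
  intro lo li ro ri _hDom hPre
  obtain ⟨h1, h2, -⟩ := hPre
  unfold Spec_parallelSort parallelSort parallelSort_alt
  dsimp only
  rw [pv_index_pairs_eq_zip li lo 0 [] h1, pv_index_pairs_eq_zip ri ro 0 [] h2,
    pv_loopA_eq lo li ro ri h1 h2 0 0 (by omega) (by omega) [] [],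
    pv_stackB_eq (li.zip lo) (ri.zip ro) []]
  obtain ⟨a, b, ha, hb, hA, hB⟩ := pv_mergeF_suffix (li.zip lo) (ri.zip ro)
  have hlz : (li.zip lo).length = lo.length := by simp; omega
  have hrz : (ri.zip ro).length = ro.length := by simp; omega
  rw [hlz] at ha
  rw [hrz] at hb
  simp only [List.drop_zero, List.nil_append, hA, hB,
    List.length_reverse, List.length_drop, hlz, hrz]
  have hia : lo.length - (lo.length - a) = a := by omega
  have hjb : ro.length - (ro.length - b) = b := by omega
  rw [hia, hjb, pv_drop_zip, pv_drop_zip, pv_zip_map_snd, pv_zip_map_fst,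
    pv_zip_map_snd, pv_zip_map_fst,
    List.take_of_length_le (by simp; omega : (lo.drop a).length ≤ (li.drop a).length),
    List.take_of_length_le (by simp; omega : (ro.drop b).length ≤ (ri.drop b).length)]
  simp only [List.length_drop, Prod.mk.injEq, List.append_assoc]
  constructor
  · trivial
  · rw [show li.drop lo.length = li.drop (a + (lo.length - a)) by congr 1; omega,
      pv_splice,
      show ri.drop ro.length = ri.drop (b + (ro.length - b)) by congr 1; omega,
      pv_take_drop_splice]
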